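-- pv_equiv track=rewrite | github.com/Agentic-governance/logistics-mcp | pipeline/tourism/effective_distance_client.py | _equipment_speed
-- ===== SOURCE A (Python) =====
-- CRUISE_SPEEDS = {
--     "B777": 905, "777": 905,
--     "B787": 900, "787": 900,
--     "B737": 840, "737": 840,
--     "A380": 920, "380": 920,
--     "A321": 840, "321": 840,
--     "A320": 840, "320": 840,
--     "B747": 910, "747": 910,
--     "A350": 910, "350": 910,
--     "A330": 870, "330": 870,
--     "B767": 860, "767": 860,
--     "A340": 870, "340": 870,
--     "E190": 830, "E90": 830,
--     "DEFAULT": 860,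
-- }
--
-- def _equipment_speed(equipment_str: str) -> float:
--     """機材文字列から巡航速度を取得"""
--     if not equipment_str:
--         return CRUISE_SPEEDS["DEFAULT"]
--     tokens = equipment_str.replace("/", " ").split()
--     for token in tokens:
--         t = token.upper().strip()
--         if t in CRUISE_SPEEDS:
--             return CRUISE_SPEEDS[t]
--         for key, speed in CRUISE_SPEEDS.items():
--             if key != "DEFAULT" and t.startswith(key[:2]) and len(t) >= 2:
--                 return speed
--     return CRUISE_SPEEDS["DEFAULT"]
-- ===== SOURCE B (Python) =====
-- CRUISE_SPEEDS = {
--     "B777": 905, "777": 905,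
--     "B787": 900, "787": 900,
--     "B737": 840, "737": 840,
--     "A380": 920, "380": 920,
--     "A321": 840, "321": 840,
--     "A320": 840, "320": 840,
--     "B747": 910, "747": 910,
--     "A350": 910, "350": 910,
--     "A330": 870, "330": 870,
--     "B767": 860, "767": 860,
--     "A340": 870, "340": 870,
--     "E190": 830, "E90": 830,
--     "DEFAULT": 860,
-- }
--
-- # Prefix table: maps each 2-char key prefix to the speed of the FIRST
-- # CRUISE_SPEEDS entry (in insertion order, DEFAULT excluded) with that prefix.
-- PREFIX_SPEEDS = {}
-- for _key, _speed in CRUISE_SPEEDS.items():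
--     if _key != "DEFAULT":
--         PREFIX_SPEEDS.setdefault(_key[:2], _speed)
--
-- def _token_speed(t):
--     """速度: 完全一致、なければ2文字プレフィックス表を引く"""
--     if t in CRUISE_SPEEDS:
--         return CRUISE_SPEEDS[t]
--     if len(t) >= 2:
--         return PREFIX_SPEEDS.get(t[:2])
--     return None
--
-- def _equipment_speed(equipment_str: str) -> float:
--     """機材文字列から巡航速度を取得"""
--     for token in equipment_str.replace("/", " ").split():
--         speed = _token_speed(token.upper().strip())
--         if speed is not None:
--             return speed
--     return CRUISE_SPEEDS["DEFAULT"]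
-- ===== Notes on version B (the rewrite author's own statement) =====
-- stated objective: simpler
-- what changed: Replaced the inner scan over all 25 CRUISE_SPEEDS keys by a once-precomputed prefix table (2-char prefix -> speed of the first matching entry, built with setdefault), so each token needs one exact lookup and one prefix lookup instead of a full key scan; the empty-string guard also disappears.
import Mathlib
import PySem

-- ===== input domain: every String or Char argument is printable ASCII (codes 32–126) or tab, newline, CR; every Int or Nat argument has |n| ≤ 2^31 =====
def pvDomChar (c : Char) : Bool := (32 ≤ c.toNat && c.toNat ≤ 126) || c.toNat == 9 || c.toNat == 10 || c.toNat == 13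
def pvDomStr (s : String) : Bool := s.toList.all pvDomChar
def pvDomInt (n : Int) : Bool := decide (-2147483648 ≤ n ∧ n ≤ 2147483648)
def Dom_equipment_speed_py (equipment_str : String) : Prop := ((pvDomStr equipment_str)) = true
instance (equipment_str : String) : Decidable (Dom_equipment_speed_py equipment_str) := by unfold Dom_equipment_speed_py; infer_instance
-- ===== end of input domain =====

-- B replaces A's inner scan over all CRUISE_SPEEDS keys by a precomputed 2-char
-- prefix table (first entry per prefix wins), for a simpler per-token lookup.

-- shared module-level constant CRUISE_SPEEDS (insertion order as in the Python)
def cruiseSpeeds : PySem.Dict String Int := PySem.Dict.ofList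
  [("B777", 905), ("777", 905), ("B787", 900), ("787", 900), ("B737", 840), ("737", 840), ("A380", 920), ("380", 920), ("A321", 840), ("321", 840), ("A320", 840), ("320", 840), ("B747", 910), ("747", 910), ("A350", 910), ("350", 910), ("A330", 870), ("330", 870), ("B767", 860), ("767", 860), ("A340", 870), ("340", 870), ("E190", 830), ("E90", 830), ("DEFAULT", 860)]

-- ===== PORT A =====
-- inner loop: 'for key, speed in CRUISE_SPEEDS.items(): if key != "DEFAULT" and t.startswith(key[:2]) and len(t) >= 2: return speed'
def aScan (t : String) : List (String × Int) → Option Int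
  | [] => none
  | (key, speed) :: rest =>
    if key ≠ "DEFAULT" ∧ PySem.Str.startswith t (PySem.Str.slice key none (some 2)) = true
        ∧ 2 ≤ PySem.Str.len t then
      some speed
    else aScan t rest

-- outer loop over tokens; 'return' inside the loop becomes Option
def aLoop : List String → Option Int
  | [] => none
  | token :: rest =>
    let t := PySem.Str.strip (PySem.Str.upper token)
    match cruiseSpeeds.get? t with
    | some v => some v
    | none =>
      match aScan t cruiseSpeeds.items with
      | some v => some v
      | none => aLoop rest

def equipment_speed_py (equipment_str : String) : Int :=
  if equipment_str = "" then cruiseSpeeds.getD "DEFAULT" 0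
  else
    match aLoop (PySem.Str.split₀ (PySem.Str.replace equipment_str "/" " ")) with
    | some v => v
    | none => cruiseSpeeds.getD "DEFAULT" 0

-- ===== PORT B =====
-- PREFIX_SPEEDS = {}; for key, speed in CRUISE_SPEEDS.items(): if key != "DEFAULT": PREFIX_SPEEDS.setdefault(key[:2], speed)
def prefixSpeeds : PySem.Dict String Int :=
  cruiseSpeeds.items.foldl
    (fun d kv =>
      if kv.1 ≠ "DEFAULT" then d.setdefault (PySem.Str.slice kv.1 none (some 2)) kv.2 else d)
    PySem.Dict.empty

-- _token_speed: exact match, else the prefix table (None becomes none)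
def bTok (t : String) : Option Int :=
  match cruiseSpeeds.get? t with
  | some v => some v
  | none =>
    if 2 ≤ PySem.Str.len t then prefixSpeeds.get? (PySem.Str.slice t none (some 2)) else none

def bLoop : List String → Option Int
  | [] => none
  | token :: rest =>
    match bTok (PySem.Str.strip (PySem.Str.upper token)) with
    | some v => some v
    | none => bLoop rest

def equipment_speed_py_alt (equipment_str : String) : Int :=
  match bLoop (PySem.Str.split₀ (PySem.Str.replace equipment_str "/" " ")) with
  | some v => v
  | none => cruiseSpeeds.getD "DEFAULT" 0

-- ===== PRECONDITION & SPEC =====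
def Spec_equipment_speed_py (equipment_str : String) (out : Int) : Prop := out = equipment_speed_py_alt equipment_str
instance (equipment_str : String) (out : Int) : Decidable (Spec_equipment_speed_py equipment_str out) := by unfold Spec_equipment_speed_py; infer_instance

-- ===== CLAIM (what is proved, stated in full; the proofs are below) =====
def Claim_equal_equipment_speed_py : Prop := ∀ (equipment_str : String), Dom_equipment_speed_py equipment_str → Spec_equipment_speed_py equipment_str (equipment_speed_py equipment_str)

-- ===== LEMMAS AND PROOFS =====

-- t.startswith(k) for a 2-character k is exactly "the 2-char prefix slice of t equals k"
lemma startswith_two (t k : String) (hk : k.toList.length = 2) :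
    (PySem.Str.startswith t k = true) ↔ (PySem.Str.slice t none (some 2) = k) := by
  rw [← String.toList_inj]
  have h1 : (PySem.Str.slice t none (some 2)).toList = t.toList.take 2 := by
    simp [PySem.List.slice_to]
  rw [h1, PySem.Str.startswith_eq, PySem.Chars.startswith_iff]
  constructor
  · intro h
    have := (List.prefix_iff_eq_take.mp h)
    rw [hk] at this
    exact this.symm
  · intro h
    rw [List.prefix_iff_eq_take, hk, ← h]

-- the per-token core: A's inner scan agrees with B's prefix-table lookup
set_option maxHeartbeats 2000000 in
set_option maxRecDepth 8192 in
lemma scan_eq_prefix (t : String) :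
    aScan t cruiseSpeeds.items =
      (if 2 ≤ PySem.Str.len t then prefixSpeeds.get? (PySem.Str.slice t none (some 2)) else none) := by
  have hitems : cruiseSpeeds.items = [("B777", 905), ("777", 905), ("B787", 900), ("787", 900), ("B737", 840), ("737", 840), ("A380", 920), ("380", 920), ("A321", 840), ("321", 840), ("A320", 840), ("320", 840), ("B747", 910), ("747", 910), ("A350", 910), ("350", 910), ("A330", 870), ("330", 870), ("B767", 860), ("767", 860), ("A340", 870), ("340", 870), ("E190", 830), ("E90", 830), ("DEFAULT", 860)] := by decide
  have hpre : prefixSpeeds = PySem.Dict.mk [("B7", 905), ("77", 905), ("78", 900), ("73", 840), ("A3", 920), ("38", 920), ("32", 840), ("74", 910), ("35", 910), ("33", 870), ("76", 860), ("34", 870), ("E1", 830), ("E9", 830)] := by decide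
  rw [hitems, hpre]
  by_cases hlen : 2 ≤ PySem.Str.len t
  · rw [if_pos hlen]
    have e0 : (PySem.Str.startswith t (PySem.Str.slice "B777" none (some 2)) = true) ↔ (PySem.Str.slice t none (some 2) = "B7") := by
      have h : PySem.Str.slice "B777" none (some 2) = "B7" := by decide
      rw [h]; exact startswith_two t "B7" (by decide)
    have d0 : ¬(("B777" : String) = "DEFAULT") := by decide
    have e1 : (PySem.Str.startswith t (PySem.Str.slice "777" none (some 2)) = true) ↔ (PySem.Str.slice t none (some 2) = "77") := by
      have h : PySem.Str.slice "777" none (some 2) = "77" := by decide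
      rw [h]; exact startswith_two t "77" (by decide)
    have d1 : ¬(("777" : String) = "DEFAULT") := by decide
    have e2 : (PySem.Str.startswith t (PySem.Str.slice "B787" none (some 2)) = true) ↔ (PySem.Str.slice t none (some 2) = "B7") := by
      have h : PySem.Str.slice "B787" none (some 2) = "B7" := by decide
      rw [h]; exact startswith_two t "B7" (by decide)
    have d2 : ¬(("B787" : String) = "DEFAULT") := by decide
    have e3 : (PySem.Str.startswith t (PySem.Str.slice "787" none (some 2)) = true) ↔ (PySem.Str.slice t none (some 2) = "78") := by
      have h : PySem.Str.slice "787" none (some 2) = "78" := by decide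
      rw [h]; exact startswith_two t "78" (by decide)
    have d3 : ¬(("787" : String) = "DEFAULT") := by decide
    have e4 : (PySem.Str.startswith t (PySem.Str.slice "B737" none (some 2)) = true) ↔ (PySem.Str.slice t none (some 2) = "B7") := by
      have h : PySem.Str.slice "B737" none (some 2) = "B7" := by decide
      rw [h]; exact startswith_two t "B7" (by decide)
    have d4 : ¬(("B737" : String) = "DEFAULT") := by decide
    have e5 : (PySem.Str.startswith t (PySem.Str.slice "737" none (some 2)) = true) ↔ (PySem.Str.slice t none (some 2) = "73") := by
      have h : PySem.Str.slice "737" none (some 2) = "73" := by decide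
      rw [h]; exact startswith_two t "73" (by decide)
    have d5 : ¬(("737" : String) = "DEFAULT") := by decide
    have e6 : (PySem.Str.startswith t (PySem.Str.slice "A380" none (some 2)) = true) ↔ (PySem.Str.slice t none (some 2) = "A3") := by
      have h : PySem.Str.slice "A380" none (some 2) = "A3" := by decide
      rw [h]; exact startswith_two t "A3" (by decide)
    have d6 : ¬(("A380" : String) = "DEFAULT") := by decide
    have e7 : (PySem.Str.startswith t (PySem.Str.slice "380" none (some 2)) = true) ↔ (PySem.Str.slice t none (some 2) = "38") := by
      have h : PySem.Str.slice "380" none (some 2) = "38" := by decide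
      rw [h]; exact startswith_two t "38" (by decide)
    have d7 : ¬(("380" : String) = "DEFAULT") := by decide
    have e8 : (PySem.Str.startswith t (PySem.Str.slice "A321" none (some 2)) = true) ↔ (PySem.Str.slice t none (some 2) = "A3") := by
      have h : PySem.Str.slice "A321" none (some 2) = "A3" := by decide
      rw [h]; exact startswith_two t "A3" (by decide)
    have d8 : ¬(("A321" : String) = "DEFAULT") := by decide
    have e9 : (PySem.Str.startswith t (PySem.Str.slice "321" none (some 2)) = true) ↔ (PySem.Str.slice t none (some 2) = "32") := by
      have h : PySem.Str.slice "321" none (some 2) = "32" := by decide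
      rw [h]; exact startswith_two t "32" (by decide)
    have d9 : ¬(("321" : String) = "DEFAULT") := by decide
    have e10 : (PySem.Str.startswith t (PySem.Str.slice "A320" none (some 2)) = true) ↔ (PySem.Str.slice t none (some 2) = "A3") := by
      have h : PySem.Str.slice "A320" none (some 2) = "A3" := by decide
      rw [h]; exact startswith_two t "A3" (by decide)
    have d10 : ¬(("A320" : String) = "DEFAULT") := by decide
    have e11 : (PySem.Str.startswith t (PySem.Str.slice "320" none (some 2)) = true) ↔ (PySem.Str.slice t none (some 2) = "32") := by
      have h : PySem.Str.slice "320" none (some 2) = "32" := by decide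
      rw [h]; exact startswith_two t "32" (by decide)
    have d11 : ¬(("320" : String) = "DEFAULT") := by decide
    have e12 : (PySem.Str.startswith t (PySem.Str.slice "B747" none (some 2)) = true) ↔ (PySem.Str.slice t none (some 2) = "B7") := by
      have h : PySem.Str.slice "B747" none (some 2) = "B7" := by decide
      rw [h]; exact startswith_two t "B7" (by decide)
    have d12 : ¬(("B747" : String) = "DEFAULT") := by decide
    have e13 : (PySem.Str.startswith t (PySem.Str.slice "747" none (some 2)) = true) ↔ (PySem.Str.slice t none (some 2) = "74") := by
      have h : PySem.Str.slice "747" none (some 2) = "74" := by decide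
      rw [h]; exact startswith_two t "74" (by decide)
    have d13 : ¬(("747" : String) = "DEFAULT") := by decide
    have e14 : (PySem.Str.startswith t (PySem.Str.slice "A350" none (some 2)) = true) ↔ (PySem.Str.slice t none (some 2) = "A3") := by
      have h : PySem.Str.slice "A350" none (some 2) = "A3" := by decide
      rw [h]; exact startswith_two t "A3" (by decide)
    have d14 : ¬(("A350" : String) = "DEFAULT") := by decide
    have e15 : (PySem.Str.startswith t (PySem.Str.slice "350" none (some 2)) = true) ↔ (PySem.Str.slice t none (some 2) = "35") := by
      have h : PySem.Str.slice "350" none (some 2) = "35" := by decide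
      rw [h]; exact startswith_two t "35" (by decide)
    have d15 : ¬(("350" : String) = "DEFAULT") := by decide
    have e16 : (PySem.Str.startswith t (PySem.Str.slice "A330" none (some 2)) = true) ↔ (PySem.Str.slice t none (some 2) = "A3") := by
      have h : PySem.Str.slice "A330" none (some 2) = "A3" := by decide
      rw [h]; exact startswith_two t "A3" (by decide)
    have d16 : ¬(("A330" : String) = "DEFAULT") := by decide
    have e17 : (PySem.Str.startswith t (PySem.Str.slice "330" none (some 2)) = true) ↔ (PySem.Str.slice t none (some 2) = "33") := by
      have h : PySem.Str.slice "330" none (some 2) = "33" := by decide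
      rw [h]; exact startswith_two t "33" (by decide)
    have d17 : ¬(("330" : String) = "DEFAULT") := by decide
    have e18 : (PySem.Str.startswith t (PySem.Str.slice "B767" none (some 2)) = true) ↔ (PySem.Str.slice t none (some 2) = "B7") := by
      have h : PySem.Str.slice "B767" none (some 2) = "B7" := by decide
      rw [h]; exact startswith_two t "B7" (by decide)
    have d18 : ¬(("B767" : String) = "DEFAULT") := by decide
    have e19 : (PySem.Str.startswith t (PySem.Str.slice "767" none (some 2)) = true) ↔ (PySem.Str.slice t none (some 2) = "76") := by
      have h : PySem.Str.slice "767" none (some 2) = "76" := by decide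
      rw [h]; exact startswith_two t "76" (by decide)
    have d19 : ¬(("767" : String) = "DEFAULT") := by decide
    have e20 : (PySem.Str.startswith t (PySem.Str.slice "A340" none (some 2)) = true) ↔ (PySem.Str.slice t none (some 2) = "A3") := by
      have h : PySem.Str.slice "A340" none (some 2) = "A3" := by decide
      rw [h]; exact startswith_two t "A3" (by decide)
    have d20 : ¬(("A340" : String) = "DEFAULT") := by decide
    have e21 : (PySem.Str.startswith t (PySem.Str.slice "340" none (some 2)) = true) ↔ (PySem.Str.slice t none (some 2) = "34") := by
      have h : PySem.Str.slice "340" none (some 2) = "34" := by decide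
      rw [h]; exact startswith_two t "34" (by decide)
    have d21 : ¬(("340" : String) = "DEFAULT") := by decide
    have e22 : (PySem.Str.startswith t (PySem.Str.slice "E190" none (some 2)) = true) ↔ (PySem.Str.slice t none (some 2) = "E1") := by
      have h : PySem.Str.slice "E190" none (some 2) = "E1" := by decide
      rw [h]; exact startswith_two t "E1" (by decide)
    have d22 : ¬(("E190" : String) = "DEFAULT") := by decide
    have e23 : (PySem.Str.startswith t (PySem.Str.slice "E90" none (some 2)) = true) ↔ (PySem.Str.slice t none (some 2) = "E9") := by
      have h : PySem.Str.slice "E90" none (some 2) = "E9" := by decide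
      rw [h]; exact startswith_two t "E9" (by decide)
    have d23 : ¬(("E90" : String) = "DEFAULT") := by decide
    simp only [aScan, e0, d0, e1, d1, e2, d2, e3, d3, e4, d4, e5, d5, e6, d6, e7, d7, e8, d8, e9, d9, e10, d10, e11, d11, e12, d12, e13, d13, e14, d14, e15, d15, e16, d16, e17, d17, e18, d18, e19, d19, e20, d20, e21, d21, e22, d22, e23, d23, hlen, and_true, ne_eq, not_false_iff, true_and,
      not_true, false_and, if_false]
    generalize PySem.Str.slice t none (some 2) = p
    simp only [PySem.Dict.get?_mk_cons, beq_iff_eq]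
    by_cases h0 : p = "B7"
    · subst h0; decide
    by_cases h1 : p = "77"
    · subst h1; decide
    by_cases h2 : p = "78"
    · subst h2; decide
    by_cases h3 : p = "73"
    · subst h3; decide
    by_cases h4 : p = "A3"
    · subst h4; decide
    by_cases h5 : p = "38"
    · subst h5; decide
    by_cases h6 : p = "32"
    · subst h6; decide
    by_cases h7 : p = "74"
    · subst h7; decide
    by_cases h8 : p = "35"
    · subst h8; decide
    by_cases h9 : p = "33"
    · subst h9; decide
    by_cases h10 : p = "76"
    · subst h10; decide
    by_cases h11 : p = "34"
    · subst h11; decide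
    by_cases h12 : p = "E1"
    · subst h12; decide
    by_cases h13 : p = "E9"
    · subst h13; decide
    have g0 : ¬(("B7":String) = p) := fun h => h0 h.symm
    have g1 : ¬(("77":String) = p) := fun h => h1 h.symm
    have g2 : ¬(("78":String) = p) := fun h => h2 h.symm
    have g3 : ¬(("73":String) = p) := fun h => h3 h.symm
    have g4 : ¬(("A3":String) = p) := fun h => h4 h.symm
    have g5 : ¬(("38":String) = p) := fun h => h5 h.symm
    have g6 : ¬(("32":String) = p) := fun h => h6 h.symm
    have g7 : ¬(("74":String) = p) := fun h => h7 h.symm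
    have g8 : ¬(("35":String) = p) := fun h => h8 h.symm
    have g9 : ¬(("33":String) = p) := fun h => h9 h.symm
    have g10 : ¬(("76":String) = p) := fun h => h10 h.symm
    have g11 : ¬(("34":String) = p) := fun h => h11 h.symm
    have g12 : ¬(("E1":String) = p) := fun h => h12 h.symm
    have g13 : ¬(("E9":String) = p) := fun h => h13 h.symm
    simp only [h0, g0, h1, g1, h2, g2, h3, g3, h4, g4, h5, g5, h6, g6, h7, g7, h8, g8, h9, g9, h10, g10, h11, g11, h12, g12, h13, g13, if_false]
    rfl
  · have hlen' : ¬ (2 ≤ t.length) := by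
      simp only [PySem.Str.len_eq] at hlen
      rw [show t.toList.length = t.length from rfl] at hlen
      omega
    simp [aScan, hlen']

lemma loop_eq (ts : List String) : aLoop ts = bLoop ts := by
  induction ts with
  | nil => rfl
  | cons token rest ih =>
    simp only [aLoop, bLoop, bTok]
    cases cruiseSpeeds.get? (PySem.Str.strip (PySem.Str.upper token)) with
    | some v => rfl
    | none =>
      rw [scan_eq_prefix]
      by_cases hlen : 2 ≤ PySem.Str.len (PySem.Str.strip (PySem.Str.upper token))
      · simp only [hlen, if_pos]
        cases prefixSpeeds.get? (PySem.Str.slice (PySem.Str.strip (PySem.Str.upper token)) none (some 2)) with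
        | some v => rfl
        | none => exact ih
      · simp only [hlen, if_neg, not_false_iff]
        exact ih

-- ===== VERDICT (by name: the statement is the Claim_ definition above) =====
theorem equipment_speed_py_spec : Claim_equal_equipment_speed_py := by
  intro s _
  unfold Spec_equipment_speed_py equipment_speed_py equipment_speed_py_alt
  by_cases hs : s = ""
  · subst hs; decide
  · simp only [hs, if_neg, not_false_iff, loop_eq]
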